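-- pv_equiv track=rewrite | github.com/ChoiBongGeun/Algorithm_practice | brute-force/1.py | solution
-- ===== SOURCE A (Python) =====
-- def solution(answers):
--     answer = []
--     result=[]
--     p=[[1,2,3,4,5],[2,1,2,3,2,4,2,5],[3,3,1,1,2,2,4,4,5,5]]
--     #p에 수포자1,수포자2,수포자3이 찍는 규칙성을 찾은뒤 리스트에 넣어 주었다
--     cnt = 0
--     for i in range(3):
--         for j in range(len(answers)):
--             if answers[j] == p[i][j%len(p[i])]:
--                 cnt += 1
--             #정답 맞힌 횟수를 cnt에 넣어 주었으며 규칙적으로 답을 적기 때문에 문제 번호 나누기 리스트의 길이를 하면 문제에 맞는 찍는 순서가 나온다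
--         if cnt >0:
--             result.append([cnt,i+1])
--             cnt = 0
--         #그렇게 해서 맞은 개수가 0이 아니면 맞은 개수와 함께 수포자1,2,3,인지를 저장해준다
--     result.sort(key=lambda x:x[0], reverse=True)
--     #개수가 많은 수대로 정렬해준다
--     for i in range(len(result)):
--         if result[i][0] == result[0][0]:
--             answer.append(result[i][1])
--             #맞은개수가 같을수도 있기 때문에 가장 많이 맞은 개수와 같은 즉 동점인 애들을 answer에 차례대로 저장한다
--     return answer
-- ===== SOURCE B (Python) =====
-- def solution(answers):
--     patterns = [[1, 2, 3, 4, 5],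
--                 [2, 1, 2, 3, 2, 4, 2, 5],
--                 [3, 3, 1, 1, 2, 2, 4, 4, 5, 5]]
--     # 40 is a common period of all three patterns: one pass builds a histogram
--     # keyed by (position mod 40, answer), then each score is 40 lookups.
--     hist = {}
--     for j, a in enumerate(answers):
--         key = (j % 40, a)
--         hist[key] = hist.get(key, 0) + 1
--     best, answer = 0, []
--     for i, p in enumerate(patterns):
--         score = sum(hist.get((r, p[r % len(p)]), 0) for r in range(40))
--         if score > best:
--             best, answer = score, [i + 1]
--         elif score == best and score > 0:
--             answer.append(i + 1)
--     return answer
-- ===== Notes on version B (the rewrite author's own statement) =====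
-- stated objective: alternative
-- what changed: B makes one pass building a histogram keyed by (position mod 40, answer) -- 40 being a common period of the three patterns -- reads each student's score off the histogram in 40 lookups, and picks winners with a running best/answer accumulator, replacing A's three full scans plus build-(count,student)-pairs, stable-sort-descending and collect-ties passes.
import Mathlib
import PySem

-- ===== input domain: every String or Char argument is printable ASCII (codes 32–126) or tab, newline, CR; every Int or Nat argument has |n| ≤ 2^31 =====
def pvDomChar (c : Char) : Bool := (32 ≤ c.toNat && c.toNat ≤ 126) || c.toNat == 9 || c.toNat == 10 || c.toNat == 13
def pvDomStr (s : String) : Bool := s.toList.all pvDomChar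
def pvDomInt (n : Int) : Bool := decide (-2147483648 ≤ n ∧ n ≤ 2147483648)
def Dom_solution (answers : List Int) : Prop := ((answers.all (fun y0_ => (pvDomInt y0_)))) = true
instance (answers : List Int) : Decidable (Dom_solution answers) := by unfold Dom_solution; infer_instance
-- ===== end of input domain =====

-- B builds, in one pass, a histogram keyed by (position mod 40, answer) — 40 is a common
-- period of the three guessing patterns — reads each score off the histogram in 40 lookups,
-- and selects the winners with a running best/answer accumulator instead of A's
-- build-pairs/stable-sort-descending/collect-ties pipeline (objective: alternative, same cost).

-- the guessing patterns of the three students (the same literal table in both Pythons)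
def pvPatterns : List (List Int) := [[1,2,3,4,5],[2,1,2,3,2,4,2,5],[3,3,1,1,2,2,4,4,5,5]]

-- ===== PORT A =====
-- inner loop of A: 'for j in range(len(answers)): if answers[j] == p[i][j%len(p[i])]: cnt += 1'
-- (j is always in range and j%len(p[i]) too, so List.getD is exact here)
def pvCnt (answers p : List Int) (init : Int) : Int :=
  (List.range answers.length).foldl (fun cnt j =>
    if answers.getD j 0 = p.getD (j % p.length) 0 then cnt + 1 else cnt) init

def solution (answers : List Int) : List Int :=
  -- state of the outer loop: (cnt, result)
  let st := (List.range 3).foldl (fun (st : Int × List (Int × Int)) i =>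
      let cnt := pvCnt answers (pvPatterns.getD i []) st.1
      if cnt > 0 then (0, st.2 ++ [(cnt, (i:Int)+1)]) else (cnt, st.2)) (0, [])
  -- result.sort(key=lambda x: x[0], reverse=True)
  let result := PySem.List.sorted st.2 (fun x => x.1) true
  -- 'for i in range(len(result)): if result[i][0] == result[0][0]: answer.append(result[i][1])'
  (List.range result.length).foldl (fun ans i =>
      if (result.getD i ((0:Int),(0:Int))).1 = (result.getD 0 ((0:Int),(0:Int))).1
      then ans ++ [(result.getD i ((0:Int),(0:Int))).2] else ans) []

-- ===== PORT B =====
-- 'for j, a in enumerate(answers): key = (j % 40, a); hist[key] = hist.get(key, 0) + 1'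
def pvHist (answers : List Int) : PySem.Dict (Int × Int) Int :=
  (PySem.List.enumerate answers).foldl
    (fun d ja =>
      d.insert (PySem.Int.mod ja.1 40, ja.2)
        (d.getD (PySem.Int.mod ja.1 40, ja.2) 0 + 1)) PySem.Dict.empty

-- 'score = sum(hist.get((r, p[r % len(p)]), 0) for r in range(40))'
def pvHistScore (answers p : List Int) : Int :=
  ((List.range 40).map (fun r =>
    (pvHist answers).getD (((r : Nat) : Int), p.getD (r % p.length) 0) 0)).sum

def solution_alt (answers : List Int) : List Int :=
  -- running (best, answer) over 'for i, p in enumerate(patterns)'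
  let st := (PySem.List.enumerate pvPatterns).foldl
    (fun (st : Int × List Int) ip =>
      let score := pvHistScore answers ip.2
      if score > st.1 then (score, [ip.1 + 1])
      else if score = st.1 ∧ score > 0 then (st.1, st.2 ++ [ip.1 + 1])
      else st) (0, [])
  st.2

-- ===== PRECONDITION & SPEC =====
def Spec_solution (answers : List Int) (out : List Int) : Prop := out = solution_alt answers
instance (answers : List Int) (out : List Int) : Decidable (Spec_solution answers out) := by unfold Spec_solution; infer_instance

-- ===== CLAIM (what is proved, stated in full; the proofs are below) =====
def Claim_equal_solution : Prop := ∀ (answers : List Int), Dom_solution answers → Spec_solution answers (solution answers)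

-- ===== LEMMAS AND PROOFS =====

-- the common per-student score, as a sum over enumerate(answers)
def pvScore (answers p : List Int) : Int :=
  ((PySem.List.enumerate answers).map
    (fun ja => if ja.2 = p.getD (ja.1.toNat % p.length) 0 then (1:Int) else 0)).sum

-- A's count loop computes init + the score
lemma cnt_eq (answers p : List Int) (init : Int) :
    pvCnt answers p init = init + pvScore answers p := by
  unfold pvCnt pvScore
  rw [PySem.List.foldl_ite_add_one, PySem.List.enumerate_eq_map_pyRange answers 0]
  have hlen : PySem.List.len answers = (answers.length : Int) := rfl
  rw [hlen, PySem.List.pyRange_zero_natCast, List.map_map, List.map_map]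
  have hfun : (((fun ja : ℤ × ℤ => if ja.2 = p.getD (ja.1.toNat % p.length) 0 then (1:Int) else 0) ∘
      (fun j : ℤ => (j, PySem.List.pyGetD answers j 0))) ∘ fun k : ℕ => (k:Int))
      = fun k : ℕ => if (decide (answers.getD k 0 = p.getD (k % p.length) 0)) = true then (1:Int) else 0 := by
    funext k
    simp [Function.comp, PySem.List.pyGetD_natCast]
  rw [hfun, PySem.List.sum_map_ite_one_zero]

lemma score_nonneg (answers p : List Int) : 0 ≤ pvScore answers p := by
  have h := cnt_eq answers p 0
  rw [zero_add] at h
  rw [← h]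
  unfold pvCnt
  rw [PySem.List.foldl_ite_add_one]
  positivity

-- the keyed list whose counter pvHist is
def pvKeyed (answers : List Int) : List (Int × Int) :=
  (PySem.List.enumerate answers).map (fun ja => (PySem.Int.mod ja.1 40, ja.2))

lemma hist_eq_counter (answers : List Int) :
    pvHist answers = PySem.Dict.counter (pvKeyed answers) := by
  unfold pvHist pvKeyed
  rw [← List.foldl_map (f := fun ja : Int × Int => (PySem.Int.mod ja.1 40, ja.2))
    (g := fun (d : PySem.Dict (Int × Int) Int) key => d.insert key (d.getD key 0 + 1)),
    PySem.Dict.foldl_insert_getD_add_one_eq_counter]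

-- summing an indicator over a nodup key list that contains x.1 exactly once
lemma sum_indicator (ks : List Int) (hnd : ks.Nodup) (j v : Int) (g : Int → Int)
    (hj : j ∈ ks) :
    (ks.map (fun r => if j = r ∧ v = g r then (1:Int) else 0)).sum
      = if v = g j then 1 else 0 := by
  induction ks with
  | nil => cases hj
  | cons k ks ih =>
    rcases List.nodup_cons.mp hnd with ⟨hk, hnd'⟩
    rcases List.mem_cons.mp hj with rfl | hj'
    · have hz : (ks.map (fun r => if j = r ∧ v = g r then (1:Int) else 0)).sum = 0 := by
        apply List.sum_eq_zero
        intro x hx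
        rcases List.mem_map.mp hx with ⟨r, hr, rfl⟩
        have : j ≠ r := fun h => hk (h ▸ hr)
        simp [this]
      simp [hz]
    · have : j ≠ k := fun h => hk (h ▸ hj')
      simp [this, ih hnd' hj']

-- Σ over a nodup key list of counts = Σ over the list of indicators
lemma sum_count_eq (ks : List Int) (hnd : ks.Nodup) (l : List (Int × Int)) (g : Int → Int)
    (h : ∀ x ∈ l, x.1 ∈ ks) :
    (ks.map (fun r => (l.count (r, g r) : Int))).sum
      = (l.map (fun x => if x.2 = g x.1 then (1:Int) else 0)).sum := by
  induction l with
  | nil => simp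
  | cons x l ih =>
    have hx : x.1 ∈ ks := h x (List.mem_cons_self ..)
    have hrest : ∀ y ∈ l, y.1 ∈ ks := fun y hy => h y (List.mem_cons_of_mem _ hy)
    have step : (ks.map (fun r => ((x :: l).count (r, g r) : Int))).sum
        = (ks.map (fun r => (l.count (r, g r) : Int))).sum
          + (ks.map (fun r => if x.1 = r ∧ x.2 = g r then (1:Int) else 0)).sum := by
      rw [← PySem.List.sum_map_add_int]
      apply congrArg
      apply List.map_congr_left
      intro r _
      rw [List.count_cons]
      by_cases hc : x = (r, g r)
      · simp [hc]
      · have h1 : ¬ (x.1 = r ∧ x.2 = g r) := by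
          intro ⟨ha, hb⟩
          exact hc (Prod.ext ha hb)
        simp [hc, h1]
    rw [step, ih hrest, sum_indicator ks hnd x.1 x.2 g hx]
    simp [add_comm]

lemma keyed_fst_mem (answers : List Int) :
    ∀ x ∈ pvKeyed answers, x.1 ∈ (List.range 40).map (fun r => ((r : Nat) : Int)) := by
  intro x hx
  rcases List.mem_map.mp hx with ⟨ja, hja, rfl⟩
  have hfst : ja.1 ∈ (PySem.List.enumerate answers).map (·.1) := List.mem_map_of_mem hja
  rw [PySem.List.map_fst_enumerate] at hfst
  have hb := (PySem.List.mem_pyRange_one.mp hfst).1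
  have h0 : (0:Int) < 40 := by norm_num
  have hnn := PySem.Int.mod_nonneg ja.1 h0
  have hlt := PySem.Int.mod_lt ja.1 h0
  refine List.mem_map.mpr ⟨(PySem.Int.mod ja.1 40).toNat, ?_, by omega⟩
  rw [List.mem_range]
  omega

-- B's histogram score equals the common score, for a pattern whose length divides 40
lemma histScore_eq (answers p : List Int) (hdvd : p.length ∣ 40) :
    pvHistScore answers p = pvScore answers p := by
  unfold pvHistScore
  have hc : ∀ r : Nat, (pvHist answers).getD (((r:Nat):Int), p.getD (r % p.length) 0) 0
      = ((pvKeyed answers).count (((r:Nat):Int), p.getD (r % p.length) 0) : Int) := by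
    intro r
    rw [hist_eq_counter, PySem.Dict.getD_counter]
  simp only [hc]
  have hmap : (List.range 40).map (fun r =>
        ((pvKeyed answers).count (((r:Nat):Int), p.getD (r % p.length) 0) : Int))
      = ((List.range 40).map (fun r => ((r:Nat):Int))).map
        (fun q => ((pvKeyed answers).count (q, p.getD (q.toNat % p.length) 0) : Int)) := by
    rw [List.map_map]
    apply List.map_congr_left
    intro r _
    rfl
  rw [hmap, sum_count_eq _ (List.nodup_range.map (fun a b h => by exact_mod_cast h)) _ _ (keyed_fst_mem answers)]
  unfold pvKeyed pvScore
  rw [List.map_map]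
  apply congrArg
  apply List.map_congr_left
  intro ja hja
  have hfst : ja.1 ∈ (PySem.List.enumerate answers).map (·.1) := List.mem_map_of_mem hja
  rw [PySem.List.map_fst_enumerate] at hfst
  have hb := (PySem.List.mem_pyRange_one.mp hfst).1
  have h0 : (0:Int) < 40 := by norm_num
  have hmod : (ja.1 % 40).toNat % p.length = ja.1.toNat % p.length := by
    have h40 : (ja.1 % 40).toNat = ja.1.toNat % 40 := by omega
    rw [h40, Nat.mod_mod_of_dvd _ hdvd]
  simp [Function.comp, hmod]

-- A's pipeline after the counting: build pairs for positive scores, sort descending, collect ties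
def pipeA (a b c : Int) : List Int :=
  let r := ((if a > 0 then ([] : List (Int × Int)) ++ [(a,1)] else []) ++
    (if b > 0 then [(b,2)] else [])) ++ (if c > 0 then [(c,3)] else [])
  let result := PySem.List.sorted r (fun x => x.1) true
  (List.range result.length).foldl (fun ans i =>
      if (result.getD i ((0:Int),(0:Int))).1 = (result.getD 0 ((0:Int),(0:Int))).1
      then ans ++ [(result.getD i ((0:Int),(0:Int))).2] else ans) []

-- B's pipeline after the counting: running (best, answer) over the three scores
def pipeB (a b c : Int) : List Int :=
  let st0 : Int × List Int := (0, [])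
  let st1 := if a > st0.1 then (a, [(1:Int)]) else if a = st0.1 ∧ a > 0 then (st0.1, st0.2 ++ [1]) else st0
  let st2 := if b > st1.1 then (b, [(2:Int)]) else if b = st1.1 ∧ b > 0 then (st1.1, st1.2 ++ [2]) else st1
  let st3 := if c > st2.1 then (c, [(3:Int)]) else if c = st2.1 ∧ c > 0 then (st2.1, st2.2 ++ [3]) else st2
  st3.2

-- the two pipelines agree on nonnegative scores
set_option maxRecDepth 8000 in
set_option maxHeartbeats 1600000 in
lemma pipe_eq (a b c : Int) (ha : 0 ≤ a) (hb : 0 ≤ b) (hc : 0 ≤ c) :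
    pipeA a b c = pipeB a b c := by
  have key : ∀ x : Int, 0 ≤ x → x = 0 ∨ 0 < x := fun x hx => by omega
  rcases key a ha with hA | hA <;> rcases key b hb with hB | hB <;>
    rcases key c hc with hC | hC <;> clear key ha hb hc <;>
  rcases lt_trichotomy a b with h1 | h1 | h1 <;>
  rcases lt_trichotomy a c with h2 | h2 | h2 <;>
  rcases lt_trichotomy b c with h3 | h3 | h3 <;>
  (try (exfalso; omega)) <;>
  (try have n1 := h1.ne) <;> (try have m1 := h1.ne') <;> (try have k1 := not_lt.mpr h1.le) <;>
  (try have n2 := h2.ne) <;> (try have m2 := h2.ne') <;> (try have k2 := not_lt.mpr h2.le) <;>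
  (try have n3 := h3.ne) <;> (try have m3 := h3.ne') <;> (try have k3 := not_lt.mpr h3.le) <;>
  (try have na := hA.ne) <;> (try have ma := hA.ne') <;>
  (try have nb := hB.ne) <;> (try have mb := hB.ne') <;>
  (try have nc := hC.ne) <;> (try have mc := hC.ne') <;>
  (try have pa := not_lt.mpr hA.le) <;> (try have pb := not_lt.mpr hB.le) <;>
  (try have pc := not_lt.mpr hC.le) <;>
  simp [pipeA, pipeB, PySem.List.sorted, PySem.List.insertBy.eq_1, PySem.List.insertBy.eq_2,
    List.getD, List.range_succ, *]

lemma solution_eq_pipeA (answers : List Int) :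
    solution answers = pipeA (pvScore answers (pvPatterns.getD 0 []))
      (pvScore answers (pvPatterns.getD 1 [])) (pvScore answers (pvPatterns.getD 2 [])) := by
  unfold solution
  have h0 := score_nonneg answers (pvPatterns.getD 0 [])
  have h1 := score_nonneg answers (pvPatterns.getD 1 [])
  have h2 := score_nonneg answers (pvPatterns.getD 2 [])
  simp only [List.getD] at h0 h1 h2 ⊢
  simp only [show List.range 3 = [0,1,2] from rfl, List.foldl_cons, List.foldl_nil, cnt_eq,
    zero_add]
  by_cases c0 : 0 < pvScore answers (pvPatterns[0]?.getD []) <;>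
    by_cases c1 : 0 < pvScore answers (pvPatterns[1]?.getD []) <;>
    by_cases c2 : 0 < pvScore answers (pvPatterns[2]?.getD []) <;>
  (try have e0 : pvScore answers (pvPatterns[0]?.getD []) = 0 := by omega) <;>
  (try have e1 : pvScore answers (pvPatterns[1]?.getD []) = 0 := by omega) <;>
  (try have e2 : pvScore answers (pvPatterns[2]?.getD []) = 0 := by omega) <;>
  simp [pipeA, List.getD, *]

lemma solution_alt_eq_pipeB (answers : List Int) :
    solution_alt answers = pipeB (pvScore answers (pvPatterns.getD 0 []))
      (pvScore answers (pvPatterns.getD 1 [])) (pvScore answers (pvPatterns.getD 2 [])) := by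
  unfold solution_alt
  have e0 := histScore_eq answers (pvPatterns.getD 0 []) (by decide)
  have e1 := histScore_eq answers (pvPatterns.getD 1 []) (by decide)
  have e2 := histScore_eq answers (pvPatterns.getD 2 []) (by decide)
  simp only [show PySem.List.enumerate pvPatterns
      = [((0:Int), pvPatterns.getD 0 []), (1, pvPatterns.getD 1 []), (2, pvPatterns.getD 2 [])]
    from rfl, List.foldl_cons, List.foldl_nil, e0, e1, e2, pipeB]
  norm_num

-- ===== VERDICT (by name: the statement is the Claim_ definition above) =====
theorem solution_spec : Claim_equal_solution := by
  intro answers _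
  unfold Spec_solution
  rw [solution_eq_pipeA, solution_alt_eq_pipeB]
  exact pipe_eq _ _ _ (score_nonneg _ _) (score_nonneg _ _) (score_nonneg _ _)
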